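-- pv_equiv track=rewrite | github.com/MouinulIslamNJIT/BallotChange | findBallotChange.py | findBallotChange
-- ===== SOURCE A (Python) =====
-- def findBallotChange(Lv, Lc, q, a, b, qmin, qmax):
--     Bq = 0
--     Dq = 0
--     Uq = 0
--     Lva = [i for (i, j) in zip(Lv, Lc) if j == "A"]
--     Lvb = [i for (i, j) in zip(Lv, Lc) if j == "B"]
--     aStar = {q - 1: 0, q: 0, q + 1: 0}
--     bStar = {q - 1: 0, q: 0, q + 1: 0}
--     for (i, j) in zip(Lv, Lc):
--         if j == 'A':
--             if i >= q + 1: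
--                 aStar[q + 1] += 1
--             if i >= q:
--                 aStar[q] += 1
--             if i >= q - 1:
--                 aStar[q - 1] += 1
--         if j == "B":
--             if i >= q + 1:
--                 bStar[q + 1] += 1
--             if i >= q:
--                 bStar[q] += 1
--             if i >= q - 1:
--                 bStar[q - 1] += 1
--     if q == qmin and q == qmax:
--         B1a = a - aStar[q + 1] + b - bStar[q + 1]
--         B1b = aStar[q] - a + bStar[q] - b
--         B1c = max(a - aStar[q + 1], aStar[q] - a)
--         B1d = max(b - bStar[q + 1], bStar[q] - b)
--         Bq = min(min(B1a, B1b), min(B1c, B1d))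
--     elif q == qmax and q > qmin:
--         L1_qplus1_a = [i for i in Lva if i < q + 1]
--         U1_qplus1 = (q + 1) * (a - aStar[q + 1]) - sum(
--             [L1_qplus1_a[i] for i in range(min(len(L1_qplus1_a), a - aStar[q + 1]))])
--         L2_q_a = [i for i in Lva if i < q]
--         U2_q = q * (a - aStar[q]) - sum([L2_q_a[i] for i in range(min(len(L2_q_a), a - aStar[q]))])
--         L1_q_b = [i for i in Lvb if i >= q]
--         L1_q_b.sort()
--         Dq = sum([L1_q_b[i] for i in range(min(len(L1_q_b), bStar[q] - b))]) - ((q - 1) * (bStar[q] - b))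
--         Bq = min(U1_qplus1, max(U2_q, Dq))
--     elif q >= qmin and q < qmax:
--         L_q_a = [i for i in Lva if i < q]
--         if a > aStar[q]:
--             Uq = q * (a - aStar[q]) - sum([L_q_a[i] for i in range(min(len(L_q_a), a - aStar[q]))])
--         else:
--             Uq = 0
--         L_q_b = [i for i in Lvb if i >= q]
--         L_q_b.sort()
--         Dq = sum([L_q_b[i] for i in range(min(len(L_q_b), bStar[q] - b))]) - ((q - 1) * (bStar[q] - b))
--         Bq = max(Uq, Dq)
--     return Bq, Uq, Dq
-- ===== SOURCE B (Python) =====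
-- def findBallotChange(Lv, Lc, q, a, b, qmin, qmax):
--     av = [v for v, c in zip(Lv, Lc) if c == "A"]
--     bv = [v for v, c in zip(Lv, Lc) if c == "B"]
--
--     def nge(vals, t):
--         # number of values >= t
--         return sum(1 for v in vals if v >= t)
--
--     def ksmallest_sum(vals, k):
--         # sum of the k smallest values (all of them if k >= len, 0 if k <= 0),
--         # by three-way quickselect partitioning instead of sorting
--         if k <= 0:
--             return 0
--         if k >= len(vals):
--             return sum(vals)
--         p = vals[len(vals) // 2]
--         lows = [v for v in vals if v < p]
--         if k <= len(lows):
--             return ksmallest_sum(lows, k)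
--         eqs = len([v for v in vals if v == p])
--         if k <= len(lows) + eqs:
--             return sum(lows) + p * (k - len(lows))
--         highs = [v for v in vals if v > p]
--         return sum(lows) + p * eqs + ksmallest_sum(highs, k - len(lows) - eqs)
--
--     def raise_cost(t):
--         # cost to lift enough A-votes up to t (first-come among votes below t)
--         k = a - nge(av, t)
--         low = [v for v in av if v < t]
--         return t * k - sum(low[:max(k, 0)])
--
--     def lower_gain():
--         # cost to push the surplus B-votes at or above q down to q-1
--         k = nge(bv, q) - b
--         return ksmallest_sum([v for v in bv if v >= q], k) - (q - 1) * k
--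
--     Bq, Uq, Dq = 0, 0, 0
--     if q == qmin and q == qmax:
--         Bq = min(a - nge(av, q + 1) + b - nge(bv, q + 1),
--                  nge(av, q) - a + nge(bv, q) - b,
--                  max(a - nge(av, q + 1), nge(av, q) - a),
--                  max(b - nge(bv, q + 1), nge(bv, q) - b))
--     elif q == qmax and q > qmin:
--         Dq = lower_gain()
--         Bq = min(raise_cost(q + 1), max(raise_cost(q), Dq))
--     elif qmin <= q < qmax:
--         Uq = raise_cost(q) if a > nge(av, q) else 0
--         Dq = lower_gain()
--         Bq = max(Uq, Dq)
--     return Bq, Uq, Dq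
-- ===== Notes on version B (the rewrite author's own statement) =====
-- stated objective: alternative
-- what changed: Replaces A's dict-building tally loop with direct filtered counts and A's sort-then-indexed-prefix-sum with a three-way quickselect that sums the k smallest B-values without sorting.
import Mathlib
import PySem

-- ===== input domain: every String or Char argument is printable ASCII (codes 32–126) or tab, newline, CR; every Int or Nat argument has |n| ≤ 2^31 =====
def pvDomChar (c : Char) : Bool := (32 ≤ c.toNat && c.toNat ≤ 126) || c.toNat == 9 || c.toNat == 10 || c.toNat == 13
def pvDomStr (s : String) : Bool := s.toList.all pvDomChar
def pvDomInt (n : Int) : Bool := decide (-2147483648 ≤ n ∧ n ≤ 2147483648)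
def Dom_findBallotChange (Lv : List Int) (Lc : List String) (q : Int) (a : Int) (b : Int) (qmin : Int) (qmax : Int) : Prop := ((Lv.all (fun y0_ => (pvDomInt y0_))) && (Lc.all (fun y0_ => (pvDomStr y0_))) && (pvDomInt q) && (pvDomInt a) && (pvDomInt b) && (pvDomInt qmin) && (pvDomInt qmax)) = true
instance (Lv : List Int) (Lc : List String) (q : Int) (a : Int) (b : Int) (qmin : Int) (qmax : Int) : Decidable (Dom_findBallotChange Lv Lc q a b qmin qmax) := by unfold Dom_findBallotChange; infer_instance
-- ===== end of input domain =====

-- B replaces A's dict-tally loop and sort-then-index-sum by direct filtered counts and a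
-- three-way quickselect summing the k smallest B-values without sorting (alternative algorithm).

-- ===== PORT A =====
-- the body of A's tally loop for one tag ('A' updates aStar, 'B' updates bStar)
def pvStep (q : Int) (tag : String) (d : PySem.Dict Int Int) (p : Int × String) : PySem.Dict Int Int :=
  if p.2 == tag then
    let d1 := if p.1 ≥ q + 1 then d.insert (q + 1) (d.getD (q + 1) 0 + 1) else d
    let d2 := if p.1 ≥ q then d1.insert q (d1.getD q 0 + 1) else d1
    if p.1 ≥ q - 1 then d2.insert (q - 1) (d2.getD (q - 1) 0 + 1) else d2
  else d

def findBallotChange (Lv : List Int) (Lc : List String) (q : Int) (a : Int) (b : Int) (qmin : Int) (qmax : Int) : List Int :=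
  let pairs := List.zip Lv Lc
  let Lva := (pairs.filter (fun p => p.2 == "A")).map (·.1)
  let Lvb := (pairs.filter (fun p => p.2 == "B")).map (·.1)
  let d0 : PySem.Dict Int Int := ((PySem.Dict.empty.insert (q - 1) 0).insert q 0).insert (q + 1) 0
  let st := pairs.foldl (fun st p => (pvStep q "A" st.1 p, pvStep q "B" st.2 p)) (d0, d0)
  let aStar := st.1
  let bStar := st.2
  if q == qmin && q == qmax then
    let B1a := a - aStar.getD (q + 1) 0 + b - bStar.getD (q + 1) 0
    let B1b := aStar.getD q 0 - a + bStar.getD q 0 - b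
    let B1c := max (a - aStar.getD (q + 1) 0) (aStar.getD q 0 - a)
    let B1d := max (b - bStar.getD (q + 1) 0) (bStar.getD q 0 - b)
    [min (min B1a B1b) (min B1c B1d), 0, 0]
  else if q == qmax && decide (q > qmin) then
    let L1a := Lva.filter (fun i => decide (i < q + 1))
    let U1 := (q + 1) * (a - aStar.getD (q + 1) 0) -
      ((PySem.List.pyRange 0 (min (PySem.List.len L1a) (a - aStar.getD (q + 1) 0)) 1).map
        (fun i => PySem.List.pyGetD L1a i 0)).sum
    let L2a := Lva.filter (fun i => decide (i < q))
    let U2 := q * (a - aStar.getD q 0) -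
      ((PySem.List.pyRange 0 (min (PySem.List.len L2a) (a - aStar.getD q 0)) 1).map
        (fun i => PySem.List.pyGetD L2a i 0)).sum
    let L1b := PySem.List.sorted (Lvb.filter (fun i => decide (i ≥ q))) (fun x => x)
    let Dq := ((PySem.List.pyRange 0 (min (PySem.List.len L1b) (bStar.getD q 0 - b)) 1).map
        (fun i => PySem.List.pyGetD L1b i 0)).sum - (q - 1) * (bStar.getD q 0 - b)
    [min U1 (max U2 Dq), 0, Dq]
  else if decide (q ≥ qmin) && decide (q < qmax) then
    let La := Lva.filter (fun i => decide (i < q))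
    let Uq := if a > aStar.getD q 0 then
        q * (a - aStar.getD q 0) -
          ((PySem.List.pyRange 0 (min (PySem.List.len La) (a - aStar.getD q 0)) 1).map
            (fun i => PySem.List.pyGetD La i 0)).sum
      else 0
    let Lb := PySem.List.sorted (Lvb.filter (fun i => decide (i ≥ q))) (fun x => x)
    let Dq := ((PySem.List.pyRange 0 (min (PySem.List.len Lb) (bStar.getD q 0 - b)) 1).map
        (fun i => PySem.List.pyGetD Lb i 0)).sum - (q - 1) * (bStar.getD q 0 - b)
    [max Uq Dq, Uq, Dq]
  else [0, 0, 0]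

-- ===== PORT B =====
-- sum(1 for v in vals if v >= t)
def pvNge (vals : List Int) (t : Int) : Int :=
  vals.foldl (fun acc v => if v ≥ t then acc + 1 else acc) 0

-- sum of the k smallest values via three-way quickselect partitioning (no sorting);
-- the fuel argument (initially the length, strictly decreasing) only makes the recursion structural
def pvKSmallestSumFuel : Nat → List Int → Int → Int
  | 0, _, _ => 0
  | fuel + 1, vals, k =>
    if k ≤ 0 then 0
    else if PySem.List.len vals ≤ k then vals.sum
    else
      -- vals[len(vals)//2]: the index is in range here, so the default is never read
      let p := PySem.List.pyGetD vals (PySem.Int.floordiv (PySem.List.len vals) 2) 0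
      let lows := vals.filter (fun v => decide (v < p))
      if k ≤ PySem.List.len lows then pvKSmallestSumFuel fuel lows k
      else
        let eqs := PySem.List.len (vals.filter (fun v => v == p))
        if k ≤ PySem.List.len lows + eqs then lows.sum + p * (k - PySem.List.len lows)
        else
          let highs := vals.filter (fun v => decide (p < v))
          lows.sum + p * eqs + pvKSmallestSumFuel fuel highs (k - PySem.List.len lows - eqs)

def pvKSmallestSum (vals : List Int) (k : Int) : Int :=
  pvKSmallestSumFuel vals.length vals k

def findBallotChange_alt (Lv : List Int) (Lc : List String) (q : Int) (a : Int) (b : Int) (qmin : Int) (qmax : Int) : List Int :=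
  let av := ((List.zip Lv Lc).filter (fun p => p.2 == "A")).map (·.1)
  let bv := ((List.zip Lv Lc).filter (fun p => p.2 == "B")).map (·.1)
  let raiseCost := fun (t : Int) =>
    let k := a - pvNge av t
    let low := av.filter (fun v => decide (v < t))
    t * k - (PySem.List.slice low none (some (max k 0))).sum
  let lowerGain :=
    let k := pvNge bv q - b
    pvKSmallestSum (bv.filter (fun v => decide (v ≥ q))) k - (q - 1) * k
  if q == qmin && q == qmax then
    [min (min (a - pvNge av (q + 1) + b - pvNge bv (q + 1)) (pvNge av q - a + pvNge bv q - b))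
       (min (max (a - pvNge av (q + 1)) (pvNge av q - a)) (max (b - pvNge bv (q + 1)) (pvNge bv q - b))), 0, 0]
  else if q == qmax && decide (q > qmin) then
    let Dq := lowerGain
    [min (raiseCost (q + 1)) (max (raiseCost q) Dq), 0, Dq]
  else if decide (q ≥ qmin) && decide (q < qmax) then
    let Uq := if a > pvNge av q then raiseCost q else 0
    let Dq := lowerGain
    [max Uq Dq, Uq, Dq]
  else [0, 0, 0]

-- ===== PRECONDITION & SPEC =====
def Spec_findBallotChange (Lv : List Int) (Lc : List String) (q : Int) (a : Int) (b : Int) (qmin : Int) (qmax : Int) (out : List Int) : Prop := out = findBallotChange_alt Lv Lc q a b qmin qmax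
instance (Lv : List Int) (Lc : List String) (q : Int) (a : Int) (b : Int) (qmin : Int) (qmax : Int) (out : List Int) : Decidable (Spec_findBallotChange Lv Lc q a b qmin qmax out) := by unfold Spec_findBallotChange; infer_instance

-- ===== CLAIM (what is proved, stated in full; the proofs are below) =====
def Claim_equal_findBallotChange : Prop := ∀ (Lv : List Int) (Lc : List String) (q : Int) (a : Int) (b : Int) (qmin : Int) (qmax : Int), Dom_findBallotChange Lv Lc q a b qmin qmax → Spec_findBallotChange Lv Lc q a b qmin qmax (findBallotChange Lv Lc q a b qmin qmax)

-- ===== LEMMAS AND PROOFS =====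

-- one step of A's tally loop, read at one of the three keys
lemma getD_pvStep (q : Int) (tag : String) (d : PySem.Dict Int Int) (p : Int × String) (t : Int)
    (ht : t = q - 1 ∨ t = q ∨ t = q + 1) :
    (pvStep q tag d p).getD t 0 =
      d.getD t 0 + (if p.2 == tag ∧ t ≤ p.1 then 1 else 0) := by
  unfold pvStep
  by_cases hp : p.2 == tag
  · simp only [hp, if_true, true_and]
    rcases ht with h | h | h <;> subst h <;> split_ifs <;>
      (try simp only [PySem.Dict.getD_insert]) <;> (try split_ifs) <;> omega
  · simp [hp]

-- A's whole tally loop, read at one of the three keys, is a count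
lemma getD_tally (q : Int) (tag : String) (pairs : List (Int × String))
    (d : PySem.Dict Int Int) (t : Int) (ht : t = q - 1 ∨ t = q ∨ t = q + 1) :
    (pairs.foldl (pvStep q tag) d).getD t 0 =
      d.getD t 0 + (pairs.countP (fun p => p.2 == tag && decide (t ≤ p.1)) : Int) := by
  induction pairs generalizing d with
  | nil => simp
  | cons p rest ih =>
    simp only [List.foldl_cons, List.countP_cons]
    rw [ih, getD_pvStep q tag d p t ht]
    by_cases h1 : p.2 == tag <;> by_cases h2 : t ≤ p.1 <;> simp [h1, h2] <;> ring

-- the initial dict reads 0 at the three keys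
lemma getD_init (q t : Int) (ht : t = q - 1 ∨ t = q ∨ t = q + 1) :
    (((PySem.Dict.empty.insert (q - 1) (0 : Int)).insert q 0).insert (q + 1) 0).getD t 0 = 0 := by
  rcases ht with h | h | h <;> subst h <;>
    simp [PySem.Dict.getD_insert]

-- B's count equals the tally count
lemma pvNge_eq (pairs : List (Int × String)) (tag : String) (t : Int) :
    pvNge ((pairs.filter (fun p => p.2 == tag)).map (·.1)) t =
      (pairs.countP (fun p => p.2 == tag && decide (t ≤ p.1)) : Int) := by
  unfold pvNge
  rw [PySem.List.foldl_ite_add_one (fun v => v ≥ t)]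
  simp only [zero_add, List.countP_map, List.countP_filter]
  congr 1
  apply List.countP_congr
  intro p _
  simp [Function.comp, ge_iff_le, Bool.and_comm]

-- A's indexed prefix sum over range(min(len L, k)) is a take-sum
lemma rangeGetD (L : List Int) (n : Nat) (h : n ≤ L.length) :
    (List.range n).map (fun k => (L[k]?).getD 0) = L.take n := by
  apply List.ext_getElem
  · simp [h]
  · intro i h1 h2
    simp at h1 h2 ⊢
    rw [List.getElem?_eq_getElem (by omega)]
    rfl

lemma idxTakeSum (L : List Int) (kk : Int) :
    ((PySem.List.pyRange 0 (min (PySem.List.len L) kk) 1).map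
      (fun i => PySem.List.pyGetD L i 0)).sum = (L.take kk.toNat).sum := by
  by_cases hk : kk ≤ 0
  · have h1 : min (PySem.List.len L) kk = kk := by
      simp only [PySem.List.len_eq]; omega
    have h2 : kk.toNat = 0 := by omega
    rw [h1, PySem.List.pyRange_one_eq_nil hk, h2]
    simp
  · have hm : 0 ≤ min (PySem.List.len L) kk := by
      simp only [PySem.List.len_eq]; omega
    rw [PySem.List.pyRange_one]
    simp only [Int.sub_zero, List.map_map]
    have hfun : ((List.range (min (PySem.List.len L) kk).toNat).map
          ((fun i => PySem.List.pyGetD L i 0) ∘ fun k : Nat => (0 : Int) + ↑k)) =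
        ((List.range (min (PySem.List.len L) kk).toNat).map (fun k => (L[k]?).getD 0)) :=
      List.map_congr_left fun k _ => by
        simp [PySem.List.pyGetD_natCast, List.getD_eq_getElem?_getD]
    rw [hfun, rangeGetD L _ (by simp only [PySem.List.len_eq] at *; omega)]
    by_cases hle : kk ≤ PySem.List.len L
    · have : min (PySem.List.len L) kk = kk := by omega
      rw [this]
    · have h1 : (min (PySem.List.len L) kk).toNat = L.length := by
        simp only [PySem.List.len_eq] at *; omega
      rw [h1, List.take_of_length_le (le_refl _),
        List.take_of_length_le (by simp only [PySem.List.len_eq] at hle; omega)]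

-- B's slice sum is the same take-sum
lemma sliceTakeSum (L : List Int) (kk : Int) :
    (PySem.List.slice L none (some (max kk 0))).sum = (L.take kk.toNat).sum := by
  rw [PySem.List.slice_to L (le_max_right kk 0)]
  have h : (max kk 0).toNat = kk.toNat := by omega
  rw [h]

-- every element of the equal block is the pivot itself
lemma pvLenFilterLt {α : Type} {l : List α} {pr : α → Bool} {x : α} (hx : x ∈ l) (hpx : pr x = false) :
    (l.filter pr).length < l.length := by
  have h1 : (l.filter pr ++ l.filter (fun a => !pr a)).length = l.length :=
    (List.filter_append_perm pr l).length_eq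
  have h2 : x ∈ l.filter (fun a => !pr a) := List.mem_filter.mpr ⟨hx, by simp [hpx]⟩
  have h3 : 0 < (l.filter (fun a => !pr a)).length := List.length_pos_of_mem h2
  simp only [List.length_append] at h1
  omega

lemma eqFilterRepl (vals : List Int) (p : Int) :
    vals.filter (fun v => v == p) = List.replicate (vals.filter (fun v => v == p)).length p := by
  apply List.eq_replicate_of_mem
  intro x hx
  have := List.of_mem_filter hx
  simpa using this

lemma sorted_split (vals : List Int) (p : Int) :
    PySem.List.sorted vals (fun x => x) =
      PySem.List.sorted (vals.filter (fun v => decide (v < p))) (fun x => x) ++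
      List.replicate (vals.filter (fun v => v == p)).length p ++
      PySem.List.sorted (vals.filter (fun v => decide (p < v))) (fun x => x) := by
  apply PySem.List.sorted_id_eq_of_perm_of_pairwise
  · -- permutation
    have h1 : (vals.filter (fun v => decide (v < p)) ++ vals.filter (fun v => !decide (v < p))).Perm vals :=
      List.filter_append_perm _ vals
    have h2 : ((vals.filter (fun v => !decide (v < p))).filter (fun v => v == p) ++
        (vals.filter (fun v => !decide (v < p))).filter (fun v => !(v == p))).Perm
        (vals.filter (fun v => !decide (v < p))) :=
      List.filter_append_perm _ _
    have e1 : (vals.filter (fun v => !decide (v < p))).filter (fun v => v == p) =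
        vals.filter (fun v => v == p) := by
      rw [List.filter_filter]
      apply List.filter_congr
      intro x _
      by_cases h : x = p
      · subst h; simp
      · simp [h]
    have e2 : (vals.filter (fun v => !decide (v < p))).filter (fun v => !(v == p)) =
        vals.filter (fun v => decide (p < v)) := by
      rw [List.filter_filter]
      apply List.filter_congr
      intro x _
      rcases lt_trichotomy x p with h | h | h
      · simp [h, not_lt_of_gt h]
      · subst h; simp
      · simp [h, h.ne', not_lt_of_gt h]
    rw [e1, e2] at h2
    have hstep : (PySem.List.sorted (vals.filter (fun v => decide (v < p))) (fun x => x) ++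
            List.replicate (vals.filter (fun v => v == p)).length p ++
            PySem.List.sorted (vals.filter (fun v => decide (p < v))) (fun x => x)).Perm
          (vals.filter (fun v => decide (v < p)) ++
            (vals.filter (fun v => v == p) ++ vals.filter (fun v => decide (p < v)))) := by
      rw [List.append_assoc]
      apply List.Perm.append (PySem.List.sorted_perm _ _ _)
      apply List.Perm.append _ (PySem.List.sorted_perm _ _ _)
      rw [← eqFilterRepl]
    exact hstep.trans ((List.Perm.append_left _ h2).trans h1)
  · -- pairwise ≤
    have mlow : ∀ x ∈ PySem.List.sorted (vals.filter (fun v => decide (v < p))) (fun x => x), x < p := by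
      intro x hx
      rw [PySem.List.mem_sorted] at hx
      have := List.of_mem_filter hx
      simpa using this
    have mhigh : ∀ x ∈ PySem.List.sorted (vals.filter (fun v => decide (p < v))) (fun x => x), p < x := by
      intro x hx
      rw [PySem.List.mem_sorted] at hx
      have := List.of_mem_filter hx
      simpa using this
    rw [List.pairwise_append, List.pairwise_append]
    refine ⟨⟨PySem.List.sorted_pairwise _ _, List.pairwise_replicate.mpr (Or.inr le_rfl), ?_⟩,
      PySem.List.sorted_pairwise _ _, ?_⟩
    · intro x hx y hy
      have := List.eq_of_mem_replicate hy
      subst this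
      exact le_of_lt (mlow x hx)
    · intro x hx y hy
      rcases List.mem_append.mp hx with h | h
      · exact le_of_lt (lt_trans (mlow x h) (mhigh y hy))
      · have := List.eq_of_mem_replicate h
        subst this
        exact le_of_lt (mhigh y hy)

-- quickselect sum = sum of the first k elements of the sorted list
lemma ksum_aux (fuel : Nat) : ∀ (vals : List Int), vals.length ≤ fuel → ∀ (k : Int),
    pvKSmallestSumFuel fuel vals k = ((PySem.List.sorted vals (fun x => x)).take k.toNat).sum := by
  induction fuel with
  | zero =>
    intro vals h k
    have hv : vals = [] := List.eq_nil_of_length_eq_zero (by omega)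
    subst hv
    have hs : PySem.List.sorted ([] : List Int) (fun x => x) = [] :=
      (PySem.List.sorted_eq_nil_iff _ _ _).mpr rfl
    simp [pvKSmallestSumFuel, hs]
  | succ n ih =>
    intro vals hlen k
    simp only [pvKSmallestSumFuel]
    have eL : PySem.List.len vals = (vals.length : Int) := PySem.List.len_eq _
    split_ifs with h1 h2 h3 h4
    · have : k.toNat = 0 := by omega
      simp [this]
    · rw [List.take_of_length_le (by rw [PySem.List.length_sorted]; omega)]
      exact ((PySem.List.sorted_perm vals _ _).sum_eq).symm
    -- case: k ≤ len lows, recurse into lows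
    · have eL : PySem.List.len vals = (vals.length : Int) := PySem.List.len_eq _
      have eLow : PySem.List.len (vals.filter (fun v => decide (v < (PySem.List.pyGetD vals (PySem.Int.floordiv (PySem.List.len vals) 2) 0)))) = (((vals.filter (fun v => decide (v < (PySem.List.pyGetD vals (PySem.Int.floordiv (PySem.List.len vals) 2) 0))))).length : Int) := PySem.List.len_eq _
      have eEq : PySem.List.len (vals.filter (fun v => v == (PySem.List.pyGetD vals (PySem.Int.floordiv (PySem.List.len vals) 2) 0))) = (((vals.filter (fun v => v == (PySem.List.pyGetD vals (PySem.Int.floordiv (PySem.List.len vals) 2) 0)))).length : Int) := PySem.List.len_eq _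
      have hpm : (PySem.List.pyGetD vals (PySem.Int.floordiv (PySem.List.len vals) 2) 0) ∈ vals := by
        apply PySem.List.pyGetD_mem
        simp only [PySem.Raise.InRange, PySem.List.len_eq]
        rw [PySem.Int.floordiv_eq_ediv_of_pos (by omega)]
        simp only [PySem.List.len_eq] at h1 h2 ⊢
        omega
      have hlt : ((vals.filter (fun v => decide (v < (PySem.List.pyGetD vals (PySem.Int.floordiv (PySem.List.len vals) 2) 0))))).length < vals.length := pvLenFilterLt hpm (by simp)
      rw [ih _ (by omega) k, sorted_split vals (PySem.List.pyGetD vals (PySem.Int.floordiv (PySem.List.len vals) 2) 0),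
        List.take_append, List.take_append]
      have hll : k.toNat ≤ (PySem.List.sorted (vals.filter (fun v => decide (v < (PySem.List.pyGetD vals (PySem.Int.floordiv (PySem.List.len vals) 2) 0)))) (fun x => x)).length := by
        rw [PySem.List.length_sorted]
        omega
      simp only [List.length_append]
      rw [Nat.sub_eq_zero_of_le hll]
      have hz : k.toNat - ((PySem.List.sorted (vals.filter (fun v => decide (v < (PySem.List.pyGetD vals (PySem.Int.floordiv (PySem.List.len vals) 2) 0)))) (fun x => x)).length +
          (List.replicate ((vals.filter (fun v => v == (PySem.List.pyGetD vals (PySem.Int.floordiv (PySem.List.len vals) 2) 0)))).length (PySem.List.pyGetD vals (PySem.Int.floordiv (PySem.List.len vals) 2) 0)).length) = 0 := by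
        simp only [List.length_replicate, PySem.List.length_sorted]
        omega
      rw [hz]
      simp
    -- case: the middle block of pivots
    · have eL : PySem.List.len vals = (vals.length : Int) := PySem.List.len_eq _
      have eLow : PySem.List.len (vals.filter (fun v => decide (v < (PySem.List.pyGetD vals (PySem.Int.floordiv (PySem.List.len vals) 2) 0)))) = (((vals.filter (fun v => decide (v < (PySem.List.pyGetD vals (PySem.Int.floordiv (PySem.List.len vals) 2) 0))))).length : Int) := PySem.List.len_eq _
      have eEq : PySem.List.len (vals.filter (fun v => v == (PySem.List.pyGetD vals (PySem.Int.floordiv (PySem.List.len vals) 2) 0))) = (((vals.filter (fun v => v == (PySem.List.pyGetD vals (PySem.Int.floordiv (PySem.List.len vals) 2) 0)))).length : Int) := PySem.List.len_eq _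
      have hpm : (PySem.List.pyGetD vals (PySem.Int.floordiv (PySem.List.len vals) 2) 0) ∈ vals := by
        apply PySem.List.pyGetD_mem
        simp only [PySem.Raise.InRange, PySem.List.len_eq]
        rw [PySem.Int.floordiv_eq_ediv_of_pos (by omega)]
        simp only [PySem.List.len_eq] at h1 h2 ⊢
        omega
      rw [sorted_split vals (PySem.List.pyGetD vals (PySem.Int.floordiv (PySem.List.len vals) 2) 0), List.take_append, List.take_append]
      have hl1 : (PySem.List.sorted (vals.filter (fun v => decide (v < (PySem.List.pyGetD vals (PySem.Int.floordiv (PySem.List.len vals) 2) 0)))) (fun x => x)).length = ((vals.filter (fun v => decide (v < (PySem.List.pyGetD vals (PySem.Int.floordiv (PySem.List.len vals) 2) 0))))).length :=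
        PySem.List.length_sorted _ _ _
      simp only [List.length_append]
      rw [List.take_of_length_le (by omega)]
      have hz : k.toNat - ((PySem.List.sorted (vals.filter (fun v => decide (v < (PySem.List.pyGetD vals (PySem.Int.floordiv (PySem.List.len vals) 2) 0)))) (fun x => x)).length +
          (List.replicate ((vals.filter (fun v => v == (PySem.List.pyGetD vals (PySem.Int.floordiv (PySem.List.len vals) 2) 0)))).length (PySem.List.pyGetD vals (PySem.Int.floordiv (PySem.List.len vals) 2) 0)).length) = 0 := by
        simp only [List.length_replicate]
        omega
      rw [hz, List.take_replicate]
      simp only [List.take_zero, List.append_nil, List.sum_append, List.sum_replicate]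
      rw [nsmul_eq_mul]
      have hs : (PySem.List.sorted (vals.filter (fun v => decide (v < (PySem.List.pyGetD vals (PySem.Int.floordiv (PySem.List.len vals) 2) 0)))) (fun x => x)).sum = ((vals.filter (fun v => decide (v < (PySem.List.pyGetD vals (PySem.Int.floordiv (PySem.List.len vals) 2) 0))))).sum :=
        (PySem.List.sorted_perm _ _ _).sum_eq
      rw [hs]
      have hmin : min (k.toNat - (PySem.List.sorted (vals.filter (fun v => decide (v < (PySem.List.pyGetD vals (PySem.Int.floordiv (PySem.List.len vals) 2) 0)))) (fun x => x)).length)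
          ((vals.filter (fun v => v == (PySem.List.pyGetD vals (PySem.Int.floordiv (PySem.List.len vals) 2) 0)))).length = k.toNat - ((vals.filter (fun v => decide (v < (PySem.List.pyGetD vals (PySem.Int.floordiv (PySem.List.len vals) 2) 0))))).length := by
        omega
      rw [hmin]
      have hc : ((k.toNat - ((vals.filter (fun v => decide (v < (PySem.List.pyGetD vals (PySem.Int.floordiv (PySem.List.len vals) 2) 0))))).length : Nat) : Int) = k - PySem.List.len (vals.filter (fun v => decide (v < (PySem.List.pyGetD vals (PySem.Int.floordiv (PySem.List.len vals) 2) 0)))) := by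
        omega
      rw [hc]
      ring
    -- case: into the highs
    · have eL : PySem.List.len vals = (vals.length : Int) := PySem.List.len_eq _
      have eLow : PySem.List.len (vals.filter (fun v => decide (v < (PySem.List.pyGetD vals (PySem.Int.floordiv (PySem.List.len vals) 2) 0)))) = (((vals.filter (fun v => decide (v < (PySem.List.pyGetD vals (PySem.Int.floordiv (PySem.List.len vals) 2) 0))))).length : Int) := PySem.List.len_eq _
      have eEq : PySem.List.len (vals.filter (fun v => v == (PySem.List.pyGetD vals (PySem.Int.floordiv (PySem.List.len vals) 2) 0))) = (((vals.filter (fun v => v == (PySem.List.pyGetD vals (PySem.Int.floordiv (PySem.List.len vals) 2) 0)))).length : Int) := PySem.List.len_eq _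
      have hpm : (PySem.List.pyGetD vals (PySem.Int.floordiv (PySem.List.len vals) 2) 0) ∈ vals := by
        apply PySem.List.pyGetD_mem
        simp only [PySem.Raise.InRange, PySem.List.len_eq]
        rw [PySem.Int.floordiv_eq_ediv_of_pos (by omega)]
        simp only [PySem.List.len_eq] at h1 h2 ⊢
        omega
      have hlt : ((vals.filter (fun v => decide ((PySem.List.pyGetD vals (PySem.Int.floordiv (PySem.List.len vals) 2) 0) < v)))).length < vals.length := pvLenFilterLt hpm (by simp)
      rw [sorted_split vals (PySem.List.pyGetD vals (PySem.Int.floordiv (PySem.List.len vals) 2) 0), List.take_append, List.take_append]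
      have hl1 : (PySem.List.sorted (vals.filter (fun v => decide (v < (PySem.List.pyGetD vals (PySem.Int.floordiv (PySem.List.len vals) 2) 0)))) (fun x => x)).length = ((vals.filter (fun v => decide (v < (PySem.List.pyGetD vals (PySem.Int.floordiv (PySem.List.len vals) 2) 0))))).length :=
        PySem.List.length_sorted _ _ _
      simp only [List.length_append]
      rw [List.take_of_length_le (by omega), List.take_of_length_le (by simp only [List.length_replicate]; omega)]
      simp only [List.sum_append, List.sum_replicate, List.length_replicate]
      rw [nsmul_eq_mul]
      have hs : (PySem.List.sorted (vals.filter (fun v => decide (v < (PySem.List.pyGetD vals (PySem.Int.floordiv (PySem.List.len vals) 2) 0)))) (fun x => x)).sum = ((vals.filter (fun v => decide (v < (PySem.List.pyGetD vals (PySem.Int.floordiv (PySem.List.len vals) 2) 0))))).sum :=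
        (PySem.List.sorted_perm _ _ _).sum_eq
      have hn : k.toNat - ((PySem.List.sorted (vals.filter (fun v => decide (v < (PySem.List.pyGetD vals (PySem.Int.floordiv (PySem.List.len vals) 2) 0)))) (fun x => x)).length + ((vals.filter (fun v => v == (PySem.List.pyGetD vals (PySem.Int.floordiv (PySem.List.len vals) 2) 0)))).length) =
          (k - PySem.List.len (vals.filter (fun v => decide (v < (PySem.List.pyGetD vals (PySem.Int.floordiv (PySem.List.len vals) 2) 0)))) - PySem.List.len (vals.filter (fun v => v == (PySem.List.pyGetD vals (PySem.Int.floordiv (PySem.List.len vals) 2) 0)))).toNat := by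
        omega
      rw [hs, hn, ih (vals.filter (fun v => decide ((PySem.List.pyGetD vals (PySem.Int.floordiv (PySem.List.len vals) 2) 0) < v))) (by omega) (k - PySem.List.len (vals.filter (fun v => decide (v < (PySem.List.pyGetD vals (PySem.Int.floordiv (PySem.List.len vals) 2) 0)))) - PySem.List.len (vals.filter (fun v => v == (PySem.List.pyGetD vals (PySem.Int.floordiv (PySem.List.len vals) 2) 0)))), eEq]
      ring

lemma ksum_eq (vals : List Int) (k : Int) :
    pvKSmallestSum vals k = ((PySem.List.sorted vals (fun x => x)).take k.toNat).sum :=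
  ksum_aux vals.length vals le_rfl k

-- A's tally dict, read at key q or q+1, is B's count over the same tag's votes
lemma getD_count (q t : Int) (tag : String) (Lv : List Int) (Lc : List String)
    (ht : t = q - 1 ∨ t = q ∨ t = q + 1) :
    (List.foldl (pvStep q tag) (((PySem.Dict.empty.insert (q - 1) (0 : Int)).insert q 0).insert (q + 1) 0)
        (List.zip Lv Lc)).getD t 0 =
      pvNge (((List.zip Lv Lc).filter (fun p => p.2 == tag)).map (·.1)) t := by
  rw [getD_tally q tag _ _ t ht, getD_init q t ht, pvNge_eq]
  simp

-- ===== VERDICT (by name: the statement is the Claim_ definition above) =====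
theorem findBallotChange_spec : Claim_equal_findBallotChange := by
  intro Lv Lc q a b qmin qmax _
  unfold Spec_findBallotChange findBallotChange findBallotChange_alt
  simp only []
  rw [PySem.List.foldl_prod_mk (f := pvStep q "A") (g := pvStep q "B")]
  simp only []
  rw [getD_count q (q + 1) "A" Lv Lc (Or.inr (Or.inr rfl)),
    getD_count q q "A" Lv Lc (Or.inr (Or.inl rfl)),
    getD_count q (q + 1) "B" Lv Lc (Or.inr (Or.inr rfl)),
    getD_count q q "B" Lv Lc (Or.inr (Or.inl rfl))]
  simp only [idxTakeSum, sliceTakeSum, ksum_eq]
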